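-- pv_equiv track=rewrite | github.com/yoyodahary/ReaserchProject | useful_functions.py | k_maj
-- ===== SOURCE A (Python) =====
-- def k_maj(rep,k = 2):
--   sum_k_major = 0
--   for i in range(len(rep)):
--     for j in range(i+1,len(rep)):
--       if rep[i]>rep[j] and rep[i]<rep[j]+k:
--         sum_k_major += 1
--   for i in range(len(rep)-1):
--     if rep[i]>=rep[i+1] +k:
--       sum_k_major+=i+1
--   return sum_k_major
-- ===== SOURCE B (Python) =====
-- def k_maj(rep, k=2):
--     # one left-to-right pass over a maintained sorted list of the values seen so far;
--     # binary search counts the earlier values strictly inside (v, v+k)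
--     def bis_left(s, x):
--         lo, hi = 0, len(s)
--         while lo < hi:
--             mid = (lo + hi) // 2
--             if s[mid] < x:
--                 lo = mid + 1
--             else:
--                 hi = mid
--         return lo
--
--     def bis_right(s, x):
--         lo, hi = 0, len(s)
--         while lo < hi:
--             mid = (lo + hi) // 2
--             if s[mid] <= x:
--                 lo = mid + 1
--             else:
--                 hi = mid
--         return lo
--
--     total = 0
--     seen = []
--     for j, v in enumerate(rep):
--         c = bis_left(seen, v + k) - bis_right(seen, v)
--         if c > 0:
--             total += c
--         if j + 1 < len(rep) and v >= rep[j + 1] + k: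
--             total += j + 1
--         seen.insert(bis_left(seen, v), v)
--     return total
-- ===== Notes on version B (the rewrite author's own statement) =====
-- stated objective: faster
-- what changed: The quadratic double loop is replaced by a single left-to-right pass that maintains a sorted list of the values seen so far and counts, by binary search, the earlier values strictly inside (v, v+k), folding the adjacent-drop bonus into the same pass.
import Mathlib
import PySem

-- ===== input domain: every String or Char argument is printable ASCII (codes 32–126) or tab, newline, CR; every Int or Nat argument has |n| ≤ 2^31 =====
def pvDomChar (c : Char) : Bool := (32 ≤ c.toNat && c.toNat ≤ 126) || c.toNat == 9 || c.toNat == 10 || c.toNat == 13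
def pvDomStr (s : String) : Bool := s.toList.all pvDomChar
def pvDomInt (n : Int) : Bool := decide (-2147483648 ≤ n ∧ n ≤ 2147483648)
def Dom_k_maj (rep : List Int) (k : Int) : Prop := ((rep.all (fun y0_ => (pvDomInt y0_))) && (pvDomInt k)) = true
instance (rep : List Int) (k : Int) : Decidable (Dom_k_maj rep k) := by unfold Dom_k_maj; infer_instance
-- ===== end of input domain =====

-- B replaces A's quadratic double loop by one left-to-right pass over a sorted list of the
-- values seen so far, counting earlier values in (v, v+k) by binary search (objective: faster).

-- ===== PORT A =====
def k_maj (rep : List Int) (k : Int) : Int :=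
  -- sum_k_major = 0; for i in range(len(rep)): for j in range(i+1, len(rep)): …
  let s1 : Int :=
    (PySem.List.pyRange 0 (PySem.List.len rep)).foldl (fun acc i =>
      (PySem.List.pyRange (i + 1) (PySem.List.len rep)).foldl (fun acc2 j =>
        if PySem.List.pyGetD rep i 0 > PySem.List.pyGetD rep j 0 ∧
           PySem.List.pyGetD rep i 0 < PySem.List.pyGetD rep j 0 + k
        then acc2 + 1 else acc2) acc) 0
  -- for i in range(len(rep)-1): if rep[i] >= rep[i+1]+k: sum_k_major += i+1
  (PySem.List.pyRange 0 (PySem.List.len rep - 1)).foldl (fun acc i =>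
    if PySem.List.pyGetD rep i 0 ≥ PySem.List.pyGetD rep (i + 1) 0 + k
    then acc + (i + 1) else acc) s1

-- ===== PORT B =====
-- loop body of Source B (bis_left / bis_right are Python's bisect algorithm = PySem.List.bisectLeft/Right)
def kmajAltStep (rep : List Int) (k : Int) (st : Int × List Int) (jv : Int × Int) : Int × List Int :=
  let total := st.1
  let seen := st.2
  let j := jv.1
  let v := jv.2
  let c : Int := (PySem.List.bisectLeft seen (v + k) : Int) - (PySem.List.bisectRight seen v : Int)
  let total := if 0 < c then total + c else total
  let total := if j + 1 < PySem.List.len rep ∧ v ≥ PySem.List.pyGetD rep (j + 1) 0 + k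
               then total + (j + 1) else total
  (total, PySem.List.insert seen ((PySem.List.bisectLeft seen v : Nat) : Int) v)

def k_maj_alt (rep : List Int) (k : Int) : Int :=
  ((PySem.List.enumerate rep).foldl (kmajAltStep rep k) ((0 : Int), ([] : List Int))).1

-- ===== PRECONDITION & SPEC =====
def Spec_k_maj (rep : List Int) (k : Int) (out : Int) : Prop := out = k_maj_alt rep k
instance (rep : List Int) (k : Int) (out : Int) : Decidable (Spec_k_maj rep k out) := by unfold Spec_k_maj; infer_instance

-- ===== CLAIM (what is proved, stated in full; the proofs are below) =====
def Claim_equal_k_maj : Prop := ∀ (rep : List Int) (k : Int), Dom_k_maj rep k → Spec_k_maj rep k (k_maj rep k)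

-- ===== LEMMAS AND PROOFS =====

-- the value contributed at index j by B's pass: earlier elements strictly in (rep[j], rep[j]+k),
-- plus the adjacent-drop bonus j+1
def bterm (rep : List Int) (k : Int) (j : Nat) : Int :=
  ((rep.take j).countP (fun y => rep.getD j 0 < y ∧ y < rep.getD j 0 + k) : Int)
  + (if (j : Int) + 1 < (rep.length : Int) ∧ rep.getD j 0 ≥ rep.getD (j + 1) 0 + k
     then (j : Int) + 1 else 0)

theorem getD_append_cons (pre t : List Int) (x d : Int) :
    (pre ++ x :: t).getD pre.length d = x := by simp [List.getD]

theorem bisectLeft_count (s : List Int) (x : Int) (hs : List.Pairwise (· ≤ ·) s) :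
    PySem.List.bisectLeft s x = s.countP (fun y => y < x) := by
  obtain ⟨hle, hlt, hge⟩ := PySem.List.bisectLeft_spec s x hs
  have hsplit : s.countP (fun y => y < x)
      = (s.take (PySem.List.bisectLeft s x)).countP (fun y => y < x)
        + (s.drop (PySem.List.bisectLeft s x)).countP (fun y => y < x) := by
    conv_lhs => rw [← List.take_append_drop (PySem.List.bisectLeft s x) s]
    exact List.countP_append
  have h1 : (s.take (PySem.List.bisectLeft s x)).countP (fun y => y < x)
      = PySem.List.bisectLeft s x := by
    have : (s.take (PySem.List.bisectLeft s x)).countP (fun y => y < x)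
        = (s.take (PySem.List.bisectLeft s x)).length := by
      rw [List.countP_eq_length]
      intro a ha
      obtain ⟨i, hi, rfl⟩ := List.mem_iff_getElem.mp ha
      rw [List.getElem_take]
      simp only [decide_eq_true_eq]
      exact hlt i (by simp at hi; omega) (by simp at hi; omega)
    rw [this, List.length_take]; omega
  have h2 : (s.drop (PySem.List.bisectLeft s x)).countP (fun y => y < x) = 0 := by
    rw [List.countP_eq_zero]
    intro a ha
    obtain ⟨i, hi, rfl⟩ := List.mem_iff_getElem.mp ha
    rw [List.getElem_drop]
    simp only [decide_eq_true_eq, not_lt]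
    exact hge _ (by simp at hi; omega) (by omega)
  omega

theorem bisectRight_count (s : List Int) (x : Int) (hs : List.Pairwise (· ≤ ·) s) :
    PySem.List.bisectRight s x = s.countP (fun y => y ≤ x) := by
  obtain ⟨hle, hlt, hge⟩ := PySem.List.bisectRight_spec s x hs
  have hsplit : s.countP (fun y => y ≤ x)
      = (s.take (PySem.List.bisectRight s x)).countP (fun y => y ≤ x)
        + (s.drop (PySem.List.bisectRight s x)).countP (fun y => y ≤ x) := by
    conv_lhs => rw [← List.take_append_drop (PySem.List.bisectRight s x) s]
    exact List.countP_append
  have h1 : (s.take (PySem.List.bisectRight s x)).countP (fun y => y ≤ x)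
      = PySem.List.bisectRight s x := by
    have : (s.take (PySem.List.bisectRight s x)).countP (fun y => y ≤ x)
        = (s.take (PySem.List.bisectRight s x)).length := by
      rw [List.countP_eq_length]
      intro a ha
      obtain ⟨i, hi, rfl⟩ := List.mem_iff_getElem.mp ha
      rw [List.getElem_take]
      simp only [decide_eq_true_eq]
      exact hlt i (by simp at hi; omega) (by simp at hi; omega)
    rw [this, List.length_take]; omega
  have h2 : (s.drop (PySem.List.bisectRight s x)).countP (fun y => y ≤ x) = 0 := by
    rw [List.countP_eq_zero]
    intro a ha
    obtain ⟨i, hi, rfl⟩ := List.mem_iff_getElem.mp ha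
    rw [List.getElem_drop]
    simp only [decide_eq_true_eq, not_le]
    exact hge _ (by simp at hi; omega) (by omega)
  omega

theorem countP_window (s : List Int) (v k : Int) (hk : 0 < k) :
    s.countP (fun y => y < v + k)
      = s.countP (fun y => y ≤ v) + s.countP (fun y => v < y ∧ y < v + k) := by
  induction s with
  | nil => simp
  | cons a t ih =>
    simp only [List.countP_cons, ih, decide_eq_true_eq]
    split_ifs <;> simp_all <;> omega

theorem insert_bisectLeft_sorted (s : List Int) (x : Int) (hs : List.Pairwise (· ≤ ·) s) :
    List.Pairwise (· ≤ ·) (PySem.List.insert s ((PySem.List.bisectLeft s x : Nat) : Int) x) ∧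
    (PySem.List.insert s ((PySem.List.bisectLeft s x : Nat) : Int) x).Perm (x :: s) := by
  obtain ⟨hle, hlt, hge⟩ := PySem.List.bisectLeft_spec s x hs
  rw [PySem.List.insert_natCast s _ x hle]
  constructor
  · rw [List.pairwise_append]
    refine ⟨hs.sublist (List.take_sublist _ _), ?_, ?_⟩
    · rw [List.pairwise_cons]
      refine ⟨?_, hs.sublist (List.drop_sublist _ _)⟩
      intro b hb
      obtain ⟨i, hi, rfl⟩ := List.mem_iff_getElem.mp hb
      rw [List.getElem_drop]
      exact hge _ (by simp at hi; omega) (by omega)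
    · intro a ha b hb
      obtain ⟨i, hi, rfl⟩ := List.mem_iff_getElem.mp ha
      rw [List.getElem_take]
      have hax : s[i]'(by simp at hi; omega) < x :=
        hlt i (by simp at hi; omega) (by simp at hi; omega)
      rcases List.mem_cons.mp hb with rfl | hb
      · exact le_of_lt hax
      · obtain ⟨t, ht, rfl⟩ := List.mem_iff_getElem.mp hb
        rw [List.getElem_drop]
        exact le_of_lt (lt_of_lt_of_le hax (hge _ (by simp at ht; omega) (by omega)))
  · have h := List.perm_middle (a := x) (l₁ := List.take (PySem.List.bisectLeft s x) s)
        (l₂ := List.drop (PySem.List.bisectLeft s x) s)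
    rwa [List.take_append_drop] at h

theorem step_value (rep : List Int) (k : Int) (pre xs seen : List Int) (x total : Int)
    (hrep : rep = pre ++ x :: xs) (hperm : seen.Perm pre) (hs : List.Pairwise (· ≤ ·) seen) :
    kmajAltStep rep k (total, seen) ((pre.length : Int), x)
      = (total + bterm rep k pre.length,
         PySem.List.insert seen ((PySem.List.bisectLeft seen x : Nat) : Int) x) := by
  have hgj : rep.getD pre.length 0 = x := by rw [hrep]; exact getD_append_cons _ _ _ _
  have htake : rep.take pre.length = pre := by rw [hrep]; exact List.take_left
  have hcnt : (if 0 < (PySem.List.bisectLeft seen (x + k) : Int) - (PySem.List.bisectRight seen x : Int)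
        then total + ((PySem.List.bisectLeft seen (x + k) : Int) - (PySem.List.bisectRight seen x : Int))
        else total)
      = total + ((rep.take pre.length).countP
          (fun y => rep.getD pre.length 0 < y ∧ y < rep.getD pre.length 0 + k) : Int) := by
    rw [htake, hgj]
    have hpc : pre.countP (fun y => x < y ∧ y < x + k)
        = seen.countP (fun y => x < y ∧ y < x + k) := (List.Perm.countP_eq _ hperm).symm
    rw [bisectLeft_count seen (x + k) hs, bisectRight_count seen x hs, hpc]
    rcases Int.lt_or_le 0 k with hk | hk
    · rw [countP_window seen x k hk]
      split_ifs with h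
      · push_cast; ring
      · have : seen.countP (fun y => x < y ∧ y < x + k) = 0 := by omega
        rw [this]; simp
    · have hz : seen.countP (fun y => x < y ∧ y < x + k) = 0 := by
        rw [List.countP_eq_zero]; intro a _; simp only [decide_eq_true_eq]; push Not
        intro h1; omega
      have hmono : seen.countP (fun y => y < x + k) ≤ seen.countP (fun y => y ≤ x) := by
        apply List.countP_mono_left; intro a _ h; simp only [decide_eq_true_eq] at *; omega
      rw [hz]
      split_ifs with h
      · omega
      · simp
  unfold kmajAltStep bterm
  simp only [PySem.List.len_eq]
  rw [hcnt]
  have hcast : ((pre.length : Int) + 1) = ((pre.length + 1 : Nat) : Int) := by push_cast; ring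
  rw [hcast, PySem.List.pyGetD_natCast]
  rw [hgj]
  split_ifs with h
  · exact Prod.ext (by push_cast; ring) rfl
  · exact Prod.ext (by push_cast; ring) rfl

theorem foldl_pyRange_body_sum (n : Nat) (F : Int → Int → Int) (G : Nat → Int) (a : Int)
    (hF : ∀ (acc : Int) (t : Nat), t < n → F acc (t : Int) = acc + G t) :
    (PySem.List.pyRange 0 (n : Int)).foldl F a = a + ∑ t ∈ Finset.range n, G t := by
  induction n generalizing a with
  | zero => simp [PySem.List.pyRange_one_eq_nil]
  | succ m ih =>
    have hcast : ((m + 1 : Nat) : Int) = (m : Int) + 1 := by push_cast; ring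
    rw [hcast, PySem.List.pyRange_one_succ_right (by positivity), List.foldl_append]
    rw [ih a (fun acc t ht => hF acc t (by omega))]
    simp only [List.foldl_cons, List.foldl_nil]
    rw [hF _ m (by omega), Finset.sum_range_succ]
    ring

theorem foldl_ite_count (p : Int → Prop) [DecidablePred p] (l : List Int) (a : Int) :
    l.foldl (fun acc y => if p y then acc + 1 else acc) a
      = a + ((l.countP (fun y => decide (p y))) : Int) := by
  rw [show (fun (acc : Int) y => if p y then acc + 1 else acc)
      = (fun (acc : Int) y => if (fun z => decide (p z)) y = true then acc + 1 else acc) by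
    funext acc y; simp]
  exact PySem.List.foldl_count_if _ l a

theorem countP_take_sum (l : List Int) (p : Int → Bool) :
    ∀ m, m ≤ l.length →
      ((l.take m).countP p : Int) = ∑ i ∈ Finset.range m, (if p (l.getD i 0) then (1 : Int) else 0) := by
  intro m
  induction m with
  | zero => simp
  | succ q ih =>
    intro hq
    rw [List.take_add_one, List.countP_append, Finset.sum_range_succ, Nat.cast_add,
        ih (by omega)]
    have hget : l[q]? = some (l.getD q 0) := by
      rw [List.getD_eq_getElem l 0 (by omega)]
      exact List.getElem?_eq_getElem (by omega)
    rw [hget]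
    simp only [Option.toList_some, List.countP_cons, List.countP_nil]
    split_ifs with h <;> simp

theorem countP_drop_sum (l : List Int) (p : Int → Bool) (m : Nat) (hm : m ≤ l.length) :
    ((l.drop m).countP p : Int)
      = ∑ i ∈ Finset.Ico m l.length, (if p (l.getD i 0) then (1 : Int) else 0) := by
  have hall := countP_take_sum l p l.length (le_refl _)
  rw [List.take_length] at hall
  have hsplit : l.countP p = (l.take m).countP p + (l.drop m).countP p := by
    conv_lhs => rw [← List.take_append_drop m l]
    exact List.countP_append
  have htk := countP_take_sum l p m hm
  have hico : (∑ i ∈ Finset.range m, (if p (l.getD i 0) then (1:Int) else 0))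
      + (∑ i ∈ Finset.Ico m l.length, (if p (l.getD i 0) then (1:Int) else 0))
      = ∑ i ∈ Finset.range l.length, (if p (l.getD i 0) then (1:Int) else 0) := by
    rw [Finset.range_eq_Ico]
    exact Finset.sum_Ico_consecutive _ (Nat.zero_le m) hm
  omega

theorem alt_fold (rep : List Int) (k : Int) :
    ∀ (xs pre seen : List Int) (total : Int),
      rep = pre ++ xs → seen.Perm pre → List.Pairwise (· ≤ ·) seen →
      ((PySem.List.enumerate xs ((pre.length : Nat) : Int)).foldl (kmajAltStep rep k) (total, seen)).1
        = total + ∑ j ∈ Finset.Ico pre.length rep.length, bterm rep k j := by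
  intro xs
  induction xs with
  | nil =>
    intro pre seen total hrep hperm hs
    have : rep.length = pre.length := by rw [hrep]; simp
    simp [PySem.List.enumerate, this]
  | cons x xs ih =>
    intro pre seen total hrep hperm hs
    rw [PySem.List.enumerate_cons, List.foldl_cons,
        step_value rep k pre xs seen x total hrep hperm hs]
    obtain ⟨hsort', hperm'⟩ := insert_bisectLeft_sorted seen x hs
    have hperm'' : (PySem.List.insert seen ((PySem.List.bisectLeft seen x : Nat) : Int) x).Perm (pre ++ [x]) :=
      hperm'.trans ((hperm.cons x).trans (List.perm_append_singleton x pre).symm)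
    have hrep' : rep = (pre ++ [x]) ++ xs := by rw [hrep, List.append_assoc]; rfl
    have hlen : ((pre.length : Int) + 1) = (((pre ++ [x]).length : Nat) : Int) := by simp
    rw [hlen, ih (pre ++ [x]) _ _ hrep' hperm'' hsort']
    have hlt : pre.length < rep.length := by rw [hrep]; simp
    rw [Finset.sum_eq_sum_Ico_succ_bot hlt (bterm rep k)]
    have : (pre ++ [x]).length = pre.length + 1 := by simp
    rw [this]; ring

theorem alt_eq_sum (rep : List Int) (k : Int) :
    k_maj_alt rep k = ∑ j ∈ Finset.range rep.length, bterm rep k j := by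
  have h := alt_fold rep k rep [] [] 0 (by simp) (List.Perm.refl _) (by simp)
  simp only [List.length_nil, Nat.cast_zero] at h
  unfold k_maj_alt
  rw [Finset.range_eq_Ico]
  exact h.trans (by ring)

theorem a_eq_sum (rep : List Int) (k : Int) :
    k_maj rep k
      = (∑ i ∈ Finset.range rep.length,
          ((rep.drop (i + 1)).countP
            (fun y => rep.getD i 0 > y ∧ rep.getD i 0 < y + k) : Int))
        + ∑ i ∈ Finset.range (rep.length - 1),
            (if rep.getD i 0 ≥ rep.getD (i + 1) 0 + k then (i : Int) + 1 else 0) := by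
  unfold k_maj
  simp only [PySem.List.len_eq]
  have hs1 : (PySem.List.pyRange 0 ((rep.length : Nat) : Int)).foldl (fun acc i =>
      (PySem.List.pyRange (i + 1) ((rep.length : Int))).foldl (fun acc2 j =>
        if PySem.List.pyGetD rep i 0 > PySem.List.pyGetD rep j 0 ∧
           PySem.List.pyGetD rep i 0 < PySem.List.pyGetD rep j 0 + k
        then acc2 + 1 else acc2) acc) 0
      = 0 + ∑ i ∈ Finset.range rep.length,
          ((rep.drop (i + 1)).countP
            (fun y => rep.getD i 0 > y ∧ rep.getD i 0 < y + k) : Int) := by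
    apply foldl_pyRange_body_sum
    intro acc t ht
    have h1 : ((t : Int) + 1) = (((t + 1 : Nat)) : Int) := by push_cast; ring
    have h2 := PySem.List.foldl_pyRange_pyGetD' rep 0
      (fun acc2 y => if PySem.List.pyGetD rep (t : Int) 0 > y ∧
          PySem.List.pyGetD rep (t : Int) 0 < y + k then acc2 + 1 else acc2) acc
      (a := (t : Int) + 1) (by positivity)
    rw [h2]
    have h3 : ((t : Int) + 1).toNat = t + 1 := by omega
    rw [h3, PySem.List.pyGetD_natCast]
    exact foldl_ite_count _ _ acc
  rw [hs1]
  rcases Nat.eq_zero_or_pos rep.length with hz | hpos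
  · have : rep = [] := List.length_eq_zero_iff.mp hz
    subst this
    simp [PySem.List.pyRange_one_eq_nil]
  · have hb : ((rep.length : Int)) - 1 = (((rep.length - 1 : Nat)) : Int) := by omega
    rw [hb]
    simp only [zero_add]
    apply foldl_pyRange_body_sum
    intro acc t ht
    have h1 : ((t : Int) + 1) = (((t + 1 : Nat)) : Int) := by push_cast; ring
    rw [h1, PySem.List.pyGetD_natCast, PySem.List.pyGetD_natCast]
    split_ifs with h
    · push_cast; ring
    · ring

theorem sums_eq (rep : List Int) (k : Int) :
    (∑ i ∈ Finset.range rep.length,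
        ((rep.drop (i + 1)).countP
          (fun y => rep.getD i 0 > y ∧ rep.getD i 0 < y + k) : Int))
      + (∑ i ∈ Finset.range (rep.length - 1),
          (if rep.getD i 0 ≥ rep.getD (i + 1) 0 + k then (i : Int) + 1 else 0))
      = ∑ j ∈ Finset.range rep.length, bterm rep k j := by
  have hpair :
      (∑ i ∈ Finset.range rep.length,
        ((rep.drop (i + 1)).countP
          (fun y => rep.getD i 0 > y ∧ rep.getD i 0 < y + k) : Int))
      = ∑ j ∈ Finset.range rep.length,
          ((rep.take j).countP
            (fun y => rep.getD j 0 < y ∧ y < rep.getD j 0 + k) : Int) := by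
    have lhs1 : ∀ i ∈ Finset.range rep.length,
        ((rep.drop (i + 1)).countP
          (fun y => rep.getD i 0 > y ∧ rep.getD i 0 < y + k) : Int)
        = ∑ j ∈ Finset.range rep.length,
            (if i + 1 ≤ j then
              (if (fun y => decide (rep.getD i 0 > y ∧ rep.getD i 0 < y + k)) (rep.getD j 0)
               then (1 : Int) else 0) else 0) := by
      intro i hi
      simp only [Finset.mem_range] at hi
      rw [countP_drop_sum rep _ (i + 1) (by omega)]
      rw [show Finset.Ico (i + 1) rep.length
            = (Finset.range rep.length).filter (fun j => i + 1 ≤ j) by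
          ext j; simp [Finset.mem_Ico, Finset.mem_filter]; omega]
      rw [Finset.sum_filter]
    have rhs1 : ∀ j ∈ Finset.range rep.length,
        ((rep.take j).countP
          (fun y => rep.getD j 0 < y ∧ y < rep.getD j 0 + k) : Int)
        = ∑ i ∈ Finset.range rep.length,
            (if i + 1 ≤ j then
              (if (fun y => decide (rep.getD j 0 < y ∧ y < rep.getD j 0 + k)) (rep.getD i 0)
               then (1 : Int) else 0) else 0) := by
      intro j hj
      simp only [Finset.mem_range] at hj
      rw [countP_take_sum rep _ j (by omega)]
      rw [show Finset.range j = (Finset.range rep.length).filter (fun i => i + 1 ≤ j) by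
          ext i; simp [Finset.mem_filter]; omega]
      rw [Finset.sum_filter]
    rw [Finset.sum_congr rfl lhs1, Finset.sum_congr rfl rhs1, Finset.sum_comm]
  have hadj :
      (∑ i ∈ Finset.range (rep.length - 1),
        (if rep.getD i 0 ≥ rep.getD (i + 1) 0 + k then (i : Int) + 1 else 0))
      = ∑ j ∈ Finset.range rep.length,
          (if (j : Int) + 1 < (rep.length : Int) ∧ rep.getD j 0 ≥ rep.getD (j + 1) 0 + k
           then (j : Int) + 1 else 0) := by
    have step : ∀ j ∈ Finset.range rep.length,
        (if (j : Int) + 1 < (rep.length : Int) ∧ rep.getD j 0 ≥ rep.getD (j + 1) 0 + k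
         then (j : Int) + 1 else 0)
        = (if j < rep.length - 1 then
            (if rep.getD j 0 ≥ rep.getD (j + 1) 0 + k then (j : Int) + 1 else 0) else 0) := by
      intro j hj
      simp only [Finset.mem_range] at hj
      by_cases h1 : j < rep.length - 1
      · have h2 : (j : Int) + 1 < (rep.length : Int) := by omega
        simp only [h1, if_true]
        by_cases h3 : rep.getD j 0 ≥ rep.getD (j + 1) 0 + k
        · rw [if_pos ⟨h2, h3⟩, if_pos h3]
        · rw [if_neg (fun hc => h3 hc.2), if_neg h3]
      · have h2 : ¬ ((j : Int) + 1 < (rep.length : Int)) := by omega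
        rw [if_neg (by tauto), if_neg h1]
    rw [Finset.sum_congr rfl step]
    conv_rhs => rw [← Finset.sum_filter]
    rw [show (Finset.range rep.length).filter (fun j => j < rep.length - 1)
          = Finset.range (rep.length - 1) by ext j; simp [Finset.mem_filter]; omega]
  rw [hpair, hadj, ← Finset.sum_add_distrib]
  rfl

-- ===== VERDICT (by name: the statement is the Claim_ definition above) =====
theorem k_maj_spec : Claim_equal_k_maj := by
  intro rep k _
  unfold Spec_k_maj
  rw [a_eq_sum, alt_eq_sum, sums_eq]
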